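-- pv_equiv track=rewrite | github.com/qawaji/gakusyu-python | puzzled-python/chapter02.py | chooseTime
-- ===== SOURCE A (Python) =====
-- def chooseTime(times, ystart, yend):
--   rcount = 0
--   maxcount = time = 0
--   for t in times:
--     if t[1] == 'start':
--       rcount += 1
--     elif t[1] == 'end':
--       rcount -= 1
--     if ystart <= t[0] and t[0] < yend and rcount > maxcount:
--       maxcount = rcount
--       time = t[0]
--   return maxcount, time
-- ===== SOURCE B (Python) =====
-- def chooseTime(times, ystart, yend):
--   # No running counter: the concurrency at event i is recomputed independently
--   # as (#'start' tags) - (#'end' tags) in the prefix times[:i+1].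
--   cands = []
--   for i, (t0, tag) in enumerate(times):
--     if ystart <= t0 < yend:
--       prefix = times[:i + 1]
--       c = sum(1 for _, g in prefix if g == 'start') - sum(1 for _, g in prefix if g == 'end')
--       if c > 0:
--         cands.append((c, t0))
--   if not cands:
--     return 0, 0
--   return max(cands, key=lambda x: x[0])
-- ===== Notes on version B (the rewrite author's own statement) =====
-- stated objective: alternative
-- what changed: B keeps no running counter or running maximum: for each event inside the window it recomputes the concurrency from scratch by counting 'start'/'end' tags in the prefix slice times[:i+1], collects the candidates, and lets max(key=...) pick the first maximal one; this trades A's O(n) single sweep for an O(n^2) prefix-recount formulation.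
import Mathlib
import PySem

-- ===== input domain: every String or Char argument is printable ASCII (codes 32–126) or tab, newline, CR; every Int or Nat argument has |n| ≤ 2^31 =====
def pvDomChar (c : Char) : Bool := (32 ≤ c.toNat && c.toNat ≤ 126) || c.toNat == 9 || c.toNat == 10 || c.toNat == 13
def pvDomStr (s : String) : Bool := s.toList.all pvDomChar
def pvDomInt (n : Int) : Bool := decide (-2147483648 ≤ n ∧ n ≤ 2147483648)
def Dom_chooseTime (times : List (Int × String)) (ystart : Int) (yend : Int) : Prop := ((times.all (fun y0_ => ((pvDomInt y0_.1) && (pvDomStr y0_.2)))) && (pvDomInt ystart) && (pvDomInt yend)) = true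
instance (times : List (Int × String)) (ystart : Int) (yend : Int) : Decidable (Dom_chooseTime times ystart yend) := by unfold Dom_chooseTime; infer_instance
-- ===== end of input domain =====

-- B keeps no running counter/maximum: it recomputes each in-window event's concurrency by counting
-- 'start'/'end' tags in the prefix slice and picks the first maximal candidate with max(key=...);
-- objective: alternative (O(n^2) vs A's O(n), a different formulation, not faster).


-- ===== PORT A =====
def chooseTime (times : List (Int × String)) (ystart : Int) (yend : Int) : Int × Int :=
  let s := times.foldl (fun (s : Int × Int × Int) t =>
    let r := if t.2 = "start" then s.1 + 1 else if t.2 = "end" then s.1 - 1 else s.1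
    if ystart ≤ t.1 ∧ t.1 < yend ∧ s.2.1 < r then (r, r, t.1) else (r, s.2.1, s.2.2))
    (0, 0, 0)
  (s.2.1, s.2.2)

-- ===== PORT B =====
def chooseTime_alt (times : List (Int × String)) (ystart : Int) (yend : Int) : Int × Int :=
  let cands := (PySem.List.enumerate times 0).foldl (fun (acc : List (Int × Int)) it =>
    if ystart ≤ it.2.1 ∧ it.2.1 < yend then
      let pre := PySem.List.slice times none (some (it.1 + 1))
      let c := (pre.countP (fun p => p.2 == "start") : Int) - (pre.countP (fun p => p.2 == "end") : Int)
      if 0 < c then acc ++ [(c, it.2.1)] else acc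
    else acc) []
  match PySem.List.max? cands (fun x => x.1) with
  | none => (0, 0)
  | some m => m

-- ===== PRECONDITION & SPEC =====
def Spec_chooseTime (times : List (Int × String)) (ystart : Int) (yend : Int) (out : Int × Int) : Prop := out = chooseTime_alt times ystart yend
instance (times : List (Int × String)) (ystart : Int) (yend : Int) (out : Int × Int) : Decidable (Spec_chooseTime times ystart yend out) := by unfold Spec_chooseTime; infer_instance

-- ===== CLAIM =====
def Claim_equal_chooseTime : Prop := ∀ (times : List (Int × String)) (ystart : Int) (yend : Int), Dom_chooseTime times ystart yend → Spec_chooseTime times ystart yend (chooseTime times ystart yend)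

-- ===== LEMMAS AND PROOFS =====

-- the running-max step both programs' selections reduce to
def pvUpd (s c : Int × Int) : Int × Int := if s.1 < c.1 then c else s

-- #starts − #ends of a list (the value B recomputes on each prefix)
def pvScore (l : List (Int × String)) : Int :=
  (l.countP (fun p => p.2 == "start") : Int) - (l.countP (fun p => p.2 == "end") : Int)

-- the candidate list produced from a running count starting at r
def pvCands (ystart yend r : Int) : List (Int × String) → List (Int × Int)
  | [] => []
  | t :: ts =>
    let c := if t.2 = "start" then r + 1 else if t.2 = "end" then r - 1 else r
    (if ystart ≤ t.1 ∧ t.1 < yend ∧ 0 < c then [(c, t.1)] else []) ++ pvCands ystart yend c ts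

theorem pvCands_pos (ts : List (Int × String)) (ystart yend r : Int) :
    ∀ x ∈ pvCands ystart yend r ts, 0 < x.1 := by
  induction ts generalizing r with
  | nil => simp [pvCands]
  | cons t ts ih =>
    intro x hx
    simp only [pvCands, List.mem_append, List.mem_ite_nil_right, List.mem_singleton] at hx
    rcases hx with ⟨h, rfl⟩ | hx
    · exact h.2.2
    · exact ih _ x hx

theorem pv_loopA (ts : List (Int × String)) (ystart yend : Int) :
    ∀ (r m tm : Int), 0 ≤ m →
      (ts.foldl (fun (s : Int × Int × Int) t =>
        let rr := if t.2 = "start" then s.1 + 1 else if t.2 = "end" then s.1 - 1 else s.1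
        if ystart ≤ t.1 ∧ t.1 < yend ∧ s.2.1 < rr then (rr, rr, t.1) else (rr, s.2.1, s.2.2))
        (r, m, tm)).2
      = (pvCands ystart yend r ts).foldl pvUpd (m, tm) := by
  induction ts with
  | nil => intro r m tm _; simp [pvCands]
  | cons t ts ih =>
    intro r m tm hm
    simp only [List.foldl_cons, pvCands, List.foldl_append]
    set rr : Int := if t.2 = "start" then r + 1 else if t.2 = "end" then r - 1 else r with hrr
    by_cases hw : ystart ≤ t.1 ∧ t.1 < yend
    · by_cases hgt : m < rr
      · have h1 : (ystart ≤ t.1 ∧ t.1 < yend ∧ m < rr) := ⟨hw.1, hw.2, hgt⟩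
        have h2 : (ystart ≤ t.1 ∧ t.1 < yend ∧ 0 < rr) := ⟨hw.1, hw.2, by omega⟩
        simp only [if_pos h1, if_pos h2]
        rw [ih rr rr t.1 (by omega)]
        simp [pvUpd, if_pos hgt]
      · have h1 : ¬ (ystart ≤ t.1 ∧ t.1 < yend ∧ m < rr) := by tauto
        simp only [if_neg h1]
        rw [ih rr m tm hm]
        by_cases hp : 0 < rr
        · have h2 : (ystart ≤ t.1 ∧ t.1 < yend ∧ 0 < rr) := ⟨hw.1, hw.2, hp⟩
          simp [if_pos h2, pvUpd, if_neg hgt]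
        · have h2 : ¬ (ystart ≤ t.1 ∧ t.1 < yend ∧ 0 < rr) := by tauto
          simp [if_neg h2]
    · have h1 : ¬ (ystart ≤ t.1 ∧ t.1 < yend ∧ m < rr) := by tauto
      have h2 : ¬ (ystart ≤ t.1 ∧ t.1 < yend ∧ 0 < rr) := by tauto
      simp only [if_neg h1, if_neg h2]
      rw [ih rr m tm hm]
      simp

-- B's recomputed prefix score steps like A's running counter
theorem pvScore_append_singleton (l : List (Int × String)) (t : Int × String) :
    pvScore (l ++ [t])
      = (if t.2 = "start" then pvScore l + 1 else if t.2 = "end" then pvScore l - 1 else pvScore l) := by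
  simp only [pvScore, List.countP_append, List.countP_cons, List.countP_nil]
  by_cases h1 : t.2 = "start" <;> by_cases h2 : t.2 = "end" <;> simp_all <;> omega

-- B's enumerate-and-recount loop produces exactly the running-count candidate list
theorem pv_loopB (times : List (Int × String)) (ystart yend : Int) :
    ∀ (ts : List (Int × String)) (k : Nat) (acc : List (Int × Int)), times.drop k = ts →
      ((PySem.List.enumerate ts (k : Int)).foldl (fun (acc : List (Int × Int)) it =>
        if ystart ≤ it.2.1 ∧ it.2.1 < yend then
          let pre := PySem.List.slice times none (some (it.1 + 1))
          let c := (pre.countP (fun p => p.2 == "start") : Int) - (pre.countP (fun p => p.2 == "end") : Int)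
          if 0 < c then acc ++ [(c, it.2.1)] else acc
        else acc) acc)
      = acc ++ pvCands ystart yend (pvScore (times.take k)) ts := by
  intro ts
  induction ts with
  | nil => intro k acc _; simp [PySem.List.enumerate, pvCands]
  | cons t ts ih =>
    intro k acc hk
    have hget : times[k]? = some t := by
      have h : (times.drop k)[0]? = some t := by rw [hk]; rfl
      simpa [List.getElem?_drop] using h
    have htake : times.take (k + 1) = times.take k ++ [t] := by
      rw [List.take_add_one, hget]; rfl
    have hdrop : times.drop (k + 1) = ts := by
      have h : times.drop (k+1) = (times.drop k).drop 1 := by rw [List.drop_drop]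
      rw [h, hk]; rfl
    have hcast : ((k : Int) + 1) = ((k + 1 : Nat) : Int) := by push_cast; ring
    have hslice : PySem.List.slice times none (some ((k : Int) + 1)) = times.take k ++ [t] := by
      rw [hcast, PySem.List.slice_to_natCast, htake]
    have hcc : ((times.take k ++ [t]).countP (fun p => p.2 == "start") : Int)
        - ((times.take k ++ [t]).countP (fun p => p.2 == "end") : Int)
        = (if t.2 = "start" then pvScore (times.take k) + 1
           else if t.2 = "end" then pvScore (times.take k) - 1 else pvScore (times.take k)) := by
      simpa [pvScore] using pvScore_append_singleton (times.take k) t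
    rw [PySem.List.enumerate_cons, List.foldl_cons]
    simp only [hslice, hcc]
    set r := pvScore (times.take k) with hr
    set rr : Int := if t.2 = "start" then r + 1 else if t.2 = "end" then r - 1 else r with hrr
    have hsc : pvScore (times.take (k+1)) = rr := by
      rw [htake, pvScore_append_singleton, ← hr]
    simp only [pvCands, ← hrr]
    by_cases hw : ystart ≤ t.1 ∧ t.1 < yend
    · simp only [if_pos hw]
      by_cases hp : (0 : Int) < rr
      · simp only [if_pos hp, if_pos (show ystart ≤ t.1 ∧ t.1 < yend ∧ 0 < rr from ⟨hw.1, hw.2, hp⟩)]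
        rw [hcast, ih (k+1) (acc ++ [(rr, t.1)]) hdrop, hsc]
        simp
      · have h2 : ¬ (ystart ≤ t.1 ∧ t.1 < yend ∧ 0 < rr) := by tauto
        simp only [if_neg hp, if_neg h2]
        rw [hcast, ih (k+1) acc hdrop, hsc]
        simp
    · have h2 : ¬ (ystart ≤ t.1 ∧ t.1 < yend ∧ 0 < rr) := by tauto
      simp only [if_neg hw, if_neg h2]
      rw [hcast, ih (k+1) acc hdrop, hsc]
      simp

-- the loop body of Python max(..., key=fst), made explicit for the proofs
def pvStep (acc : Option (Int × Int)) (x : Int × Int) : Option (Int × Int) :=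
  match acc with
  | none => some x
  | some m => if m.1 < x.1 then some x else some m

theorem pv_max?_eq (cs : List (Int × Int)) :
    PySem.List.max? cs (fun y => y.1) = cs.foldl pvStep none := by
  unfold PySem.List.max?
  congr 1
  funext acc x
  cases acc <;> rfl

theorem pv_max?_foldl (t : List (Int × Int)) :
    ∀ s : Int × Int, t.foldl pvStep (some s) = some (t.foldl pvUpd s) := by
  induction t with
  | nil => intro s; simp
  | cons x t ih =>
    intro s
    simp only [List.foldl_cons, pvStep, pvUpd]
    split_ifs <;> exact ih _

theorem pv_select (cs : List (Int × Int)) (hpos : ∀ x ∈ cs, 0 < x.1) :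
    (match PySem.List.max? cs (fun x => x.1) with
     | none => ((0 : Int), (0 : Int))
     | some m => m)
    = cs.foldl pvUpd (0, 0) := by
  rw [pv_max?_eq]
  cases cs with
  | nil => simp
  | cons x t =>
    have hx : (0 : Int) < x.1 := hpos x (by simp)
    have h0 : pvStep none x = some x := rfl
    simp only [List.foldl_cons, h0, pv_max?_foldl, pvUpd, if_pos hx]

-- ===== VERDICT =====
theorem chooseTime_spec : Claim_equal_chooseTime := by
  intro times ystart yend _
  unfold Spec_chooseTime chooseTime chooseTime_alt
  simp only
  rw [pv_loopA times ystart yend 0 0 0 le_rfl]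
  have hB := pv_loopB times ystart yend times 0 [] rfl
  simp only [Nat.cast_zero, List.take_zero, List.nil_append, pvScore, List.countP_nil,
    Nat.cast_zero, sub_zero] at hB
  rw [hB, pv_select _ (pvCands_pos times ystart yend 0)]
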